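-- pv_equiv track=rewrite | github.com/sankhadip10/project_commit | production/Scaler/DataStructure_Python/Sorting/elementRemoval.py | solve
-- ===== SOURCE A (Python) =====
-- def solve(A):
--     n = len(A)
--     A.sort()
--
--     count = 1  # a+2b+3c+4d
--     ans = 0
--     for i in range(n-1, -1, -1):   # end of array, till -1, hopping -1
--         ans += count * A[i]
--
--         count += 1
--     return ans
-- ===== SOURCE B (Python) =====
-- def solve(A):
--     A.sort()
--     pre = 0
--     ans = 0
--     for x in A:
--         pre += x
--         ans += pre
--     return ans
-- ===== Notes on version B (the rewrite author's own statement) =====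
-- stated objective: alternative
-- what changed: Replaces the reverse index loop multiplying each element by a descending-rank counter with a forward prefix-sum pass over the sorted list (the rank-weighted sum equals the sum of all prefix sums).
import Mathlib
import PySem

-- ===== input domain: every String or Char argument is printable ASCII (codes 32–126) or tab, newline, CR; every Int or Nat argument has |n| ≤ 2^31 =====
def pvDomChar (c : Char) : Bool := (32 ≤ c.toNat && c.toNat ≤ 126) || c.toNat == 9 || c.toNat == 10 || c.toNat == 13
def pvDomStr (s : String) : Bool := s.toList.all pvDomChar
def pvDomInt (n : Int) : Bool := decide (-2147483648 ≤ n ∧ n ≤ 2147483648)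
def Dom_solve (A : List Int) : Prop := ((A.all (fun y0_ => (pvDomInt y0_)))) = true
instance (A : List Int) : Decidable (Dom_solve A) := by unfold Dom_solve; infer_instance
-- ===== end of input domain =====

-- B replaces A's reverse rank-weighted loop with a forward prefix-sum pass (alternative
-- decomposition, same cost). Both Pythons sort A in place; the equivalence proved is about
-- the return value (B performs the same mutation).

-- ===== PORT A =====
def solve (A : List Int) : Int :=
  let n := A.length
  let s := PySem.List.sorted A (fun x => x) false
  let st := (PySem.List.pyRange ((n : Int) - 1) (-1) (-1)).foldl
    (fun (p : Int × Int) i => (p.1 + 1, p.2 + p.1 * PySem.List.pyGetD s i 0)) (1, 0)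
  st.2

-- ===== PORT B =====
def solve_alt (A : List Int) : Int :=
  let s := PySem.List.sorted A (fun x => x) false
  (s.foldl (fun (p : Int × Int) x => (p.1 + x, p.2 + (p.1 + x))) (0, 0)).2

-- ===== PRECONDITION & SPEC =====
def Spec_solve (A : List Int) (out : Int) : Prop := out = solve_alt A
instance (A : List Int) (out : Int) : Decidable (Spec_solve A out) := by unfold Spec_solve; infer_instance

-- ===== CLAIM (what is proved, stated in full; the proofs are below) =====
def Claim_equal_solve : Prop := ∀ (A : List Int), Dom_solve A → Spec_solve A (solve A)

-- ===== LEMMAS AND PROOFS =====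

/-- A's loop body on the count/answer pair. -/
def stepA (p : Int × Int) (x : Int) : Int × Int := (p.1 + 1, p.2 + p.1 * x)

/-- B's loop body on the prefix/answer pair. -/
def stepB (p : Int × Int) (x : Int) : Int × Int := (p.1 + x, p.2 + (p.1 + x))

/-- Closed form of A's loop: rank-weighted sum starting at weight c. -/
def W (c : Int) : List Int → Int
  | [] => 0
  | x :: t => c * x + W (c + 1) t

/-- Closed form of B's loop: sum of prefix sums continuing a running prefix p. -/
def SP (p : Int) : List Int → Int
  | [] => 0
  | x :: t => (p + x) + SP (p + x) t

theorem foldl_stepA (l : List Int) : ∀ c a, (l.foldl stepA (c, a)).2 = a + W c l := by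
  induction l with
  | nil => intro c a; simp [W]
  | cons x t ih => intro c a; simp only [List.foldl_cons, stepA, W, ih]; ring

theorem foldl_stepB (l : List Int) : ∀ p a, (l.foldl stepB (p, a)).2 = a + SP p l := by
  induction l with
  | nil => intro p a; simp [SP]
  | cons x t ih => intro p a; simp only [List.foldl_cons, stepB, SP, ih]; ring

theorem SP_shift (l : List Int) : ∀ p, SP p l = SP 0 l + p * l.length := by
  induction l with
  | nil => intro p; simp [SP]
  | cons x t ih =>
    intro p
    simp only [SP, List.length_cons]
    rw [ih (p + x), ih (0 + x)]
    push_cast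
    ring

theorem W_append (l : List Int) (y : Int) : ∀ c, W c (l ++ [y]) = W c l + (c + l.length) * y := by
  induction l with
  | nil => intro c; simp [W]
  | cons x t ih =>
    intro c
    simp only [List.cons_append, W, List.length_cons, ih (c + 1)]
    push_cast
    ring

theorem W_reverse (l : List Int) : W 1 l.reverse = SP 0 l := by
  induction l with
  | nil => simp [W, SP]
  | cons x t ih =>
    simp only [List.reverse_cons, W_append, ih, List.length_reverse, SP]
    rw [SP_shift t (0 + x)]
    ring

-- ===== VERDICT (by name: the statement is the Claim_ definition above) =====
theorem solve_spec : Claim_equal_solve := by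
  intro A _
  unfold Spec_solve solve solve_alt
  set s := PySem.List.sorted A (fun x => x) false with hs
  have hlen : A.length = s.length := (PySem.List.length_sorted A (fun x => x) false).symm
  have hrange : PySem.List.pyRange ((A.length : Int) - 1) (-1) (-1)
      = (PySem.List.pyRange 0 (s.length : Int) 1).reverse := by
    rw [PySem.List.pyRange_neg_one_eq_reverse, hlen]
    norm_num
  simp only [hrange]
  have h1 : ∀ (l : List Int) (init : Int × Int),
      l.foldl (fun (p : Int × Int) i => (p.1 + 1, p.2 + p.1 * PySem.List.pyGetD s i 0)) init
        = (l.map (fun i => PySem.List.pyGetD s i 0)).foldl stepA init := by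
    intro l init
    rw [List.foldl_map]
    rfl
  rw [h1, List.map_reverse, PySem.List.map_pyGetD_pyRange_zero']
  show (s.reverse.foldl stepA (1, 0)).2 = (s.foldl stepB (0, 0)).2
  rw [foldl_stepA, foldl_stepB, W_reverse]
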